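-- pv_equiv track=rewrite | github.com/kennethyzeng/pythonByTopics_N_SmallProjects | 002SmallProjects/list_sortlast_matchend_frontx.py | front_x
-- ===== SOURCE A (Python) =====
-- def front_x(words):
--     x_list =[]
--     rest_list =[]
--     for word in words:
--         if word.startswith('x') or word.startswith('X'):
--             x_list.append(word)
--         else:
--             rest_list.append(word)
--     return sorted(x_list) + sorted(rest_list)
-- ===== SOURCE B (Python) =====
-- def front_x(words):
--     return sorted(words, key=lambda w: (not (w.startswith('x') or w.startswith('X')), w))
-- ===== Notes on version B (the rewrite author's own statement) =====
-- stated objective: idiomatic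
-- what changed: Replaces the explicit two-bucket partition loop plus two separate sorts and a concatenation with a single sorted() call over the whole list using a composite (not-starts-with-x, word) key.
import Mathlib
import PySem

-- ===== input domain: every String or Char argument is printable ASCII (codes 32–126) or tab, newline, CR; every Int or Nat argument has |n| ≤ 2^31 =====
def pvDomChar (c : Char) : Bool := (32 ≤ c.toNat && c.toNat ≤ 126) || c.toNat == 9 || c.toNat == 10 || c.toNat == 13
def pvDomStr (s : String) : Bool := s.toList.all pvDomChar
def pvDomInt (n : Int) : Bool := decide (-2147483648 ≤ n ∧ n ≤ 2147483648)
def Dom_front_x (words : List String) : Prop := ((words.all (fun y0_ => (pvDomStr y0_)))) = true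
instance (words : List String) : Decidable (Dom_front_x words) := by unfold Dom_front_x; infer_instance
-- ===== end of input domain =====

-- B replaces A's partition-loop + two sorts + concatenation by one keyed sorted() call (idiomatic).

-- ===== PORT A =====
def front_x (words : List String) : List String :=
  let p := words.foldl
    (fun (acc : List String × List String) word =>
      if PySem.Str.startswith word "x" || PySem.Str.startswith word "X" then
        (acc.1 ++ [word], acc.2)
      else
        (acc.1, acc.2 ++ [word]))
    ([], [])
  PySem.List.sorted p.1 (fun w => w) false ++ PySem.List.sorted p.2 (fun w => w) false

-- ===== PORT B =====
def front_x_alt (words : List String) : List String :=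
  PySem.List.sorted2 words
    (fun w => !(PySem.Str.startswith w "x" || PySem.Str.startswith w "X"))
    (fun w => w) false

-- ===== PRECONDITION & SPEC =====
def Spec_front_x (words : List String) (out : List String) : Prop := out = front_x_alt words
instance (words : List String) (out : List String) : Decidable (Spec_front_x words out) := by unfold Spec_front_x; infer_instance

-- ===== CLAIM (what is proved, stated in full; the proofs are below) =====
def Claim_equal_front_x : Prop := ∀ (words : List String), Dom_front_x words → Spec_front_x words (front_x words)

-- ===== LEMMAS AND PROOFS =====

-- the 'starts with x or X' test, abbreviated
def pvIsX (w : String) : Bool := PySem.Str.startswith w "x" || PySem.Str.startswith w "X"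

-- the composite sort key of B, as an injective map into a linear order
def pvKey (w : String) : Lex (Bool × String) := toLex (!pvIsX w, w)

theorem pvKey_injective : Function.Injective pvKey := by
  intro a b h
  have := congrArg (fun p => (ofLex p).2) h
  simpa [pvKey] using this

-- A's partition loop computes the two filters
theorem front_x_foldl_eq (words : List String) (acc : List String × List String) :
    words.foldl
      (fun (acc : List String × List String) word =>
        if PySem.Str.startswith word "x" || PySem.Str.startswith word "X" then
          (acc.1 ++ [word], acc.2)
        else
          (acc.1, acc.2 ++ [word])) acc
    = (acc.1 ++ words.filter pvIsX, acc.2 ++ words.filter (fun w => !pvIsX w)) := by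
  induction words generalizing acc with
  | nil => simp
  | cons w ws ih =>
    simp only [List.foldl_cons]
    by_cases h : pvIsX w = true
    · rw [if_pos (show (PySem.Str.startswith w "x" || PySem.Str.startswith w "X") = true from h), ih,
        List.filter_cons, List.filter_cons]
      simp [h]
    · simp only [Bool.not_eq_true] at h
      rw [if_neg (show ¬ ((PySem.Str.startswith w "x" || PySem.Str.startswith w "X") = true) from
          fun hc => absurd (show pvIsX w = true from hc) (by simp [h])), ih,
        List.filter_cons, List.filter_cons]
      simp [h]

-- sorted2 with keys into linear orders is sorted with the lexicographic key
theorem sorted2_eq_sorted_lex {α κ₁ κ₂ : Type} [LinearOrder κ₁] [LinearOrder κ₂]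
    (xs : List α) (k1 : α → κ₁) (k2 : α → κ₂) :
    PySem.List.sorted2 xs k1 k2 false
      = PySem.List.sorted xs (fun x => toLex (k1 x, k2 x)) false := by
  have h : (fun (a b : α) => decide (k1 a < k1 b) || (!decide (k1 b < k1 a) && decide (k2 a < k2 b)))
      = (fun (a b : α) => decide (toLex (k1 a, k2 a) < toLex (k1 b, k2 b))) := by
    funext a b
    rcases lt_trichotomy (k1 a) (k1 b) with h | h | h
    · simp [Prod.Lex.toLex_lt_toLex, h, not_lt_of_gt h]
    · simp [Prod.Lex.toLex_lt_toLex, h]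
    · simp [Prod.Lex.toLex_lt_toLex, not_lt_of_gt h, ne_of_gt h]
      exact fun hle => absurd hle (not_le_of_gt h)
  simp only [PySem.List.sorted2, PySem.List.sorted, h, if_neg (by decide : ¬ (false = true))]

theorem pairwise_key_of_sorted (xs : List String) (q : String → Bool) (c : Bool)
    (hq : ∀ w, q w = true → pvIsX w = c) :
    (PySem.List.sorted (xs.filter q) (fun w => w) false).Pairwise
      (fun u v => pvKey u ≤ pvKey v) := by
  have hp := PySem.List.sorted_pairwise (xs.filter q) (fun w => w)
  refine List.Pairwise.imp_of_mem ?_ hp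
  intro u v hu hv h
  have hu' : pvIsX u = c := hq u (List.of_mem_filter ((PySem.List.mem_sorted _ _ _ _).1 hu))
  have hv' : pvIsX v = c := hq v (List.of_mem_filter ((PySem.List.mem_sorted _ _ _ _).1 hv))
  rcases lt_or_eq_of_le h with h | h
  · exact le_of_lt (by simp [pvKey, Prod.Lex.toLex_lt_toLex, hu', hv', h])
  · exact le_of_eq (by simp [pvKey, hv', h])

theorem front_x_spec' (words : List String) : front_x words = front_x_alt words := by
  have hB : front_x_alt words = PySem.List.sorted words pvKey false := by
    unfold front_x_alt
    rw [sorted2_eq_sorted_lex]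
    rfl
  have hA : front_x words
      = PySem.List.sorted (words.filter pvIsX) (fun w => w) false
        ++ PySem.List.sorted (words.filter (fun w => !pvIsX w)) (fun w => w) false := by
    unfold front_x
    rw [front_x_foldl_eq]
    simp
  rw [hA, hB]
  apply PySem.List.eq_of_perm_of_pairwise_le_of_injective pvKey pvKey_injective
  · -- permutation
    have h1 := PySem.List.sorted_perm (words.filter pvIsX) (fun w => w) false
    have h2 := PySem.List.sorted_perm (words.filter (fun w => !pvIsX w)) (fun w => w) false
    have h3 := PySem.List.sorted_perm words pvKey false
    exact ((h1.append h2).trans (List.filter_append_perm pvIsX words)).trans h3.symm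
  · -- the concatenation is pairwise-sorted under the composite key
    rw [List.pairwise_append]
    refine ⟨pairwise_key_of_sorted words pvIsX true (fun _ h => h),
      pairwise_key_of_sorted words (fun w => !pvIsX w) false (fun w h => by simpa using h), ?_⟩
    intro u hu v hv
    have hu' : pvIsX u = true := List.of_mem_filter ((PySem.List.mem_sorted _ _ _ _).1 hu)
    have hv' : pvIsX v = false := by
      have := List.of_mem_filter ((PySem.List.mem_sorted _ _ _ _).1 hv)
      simpa using this
    exact le_of_lt (by simp [pvKey, Prod.Lex.toLex_lt_toLex, hu', hv'])
  · exact PySem.List.sorted_pairwise words pvKey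

-- ===== VERDICT (by name: the statement is the Claim_ definition above) =====
theorem front_x_spec : Claim_equal_front_x := by
  intro words _
  exact front_x_spec' words
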